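-- pv_equiv track=rewrite | github.com/fromDisco/DCI_ASSESSMENTS | python_basics/python-collection-basics/17-python-collections-unique-sort-fromDisco/unique_char_sort.py | unique_char_sort
-- ===== SOURCE A (Python) =====
-- def unique_char_sort(words):
--     """
--     Count unique chars of words in list,
--     and sort them from less unique chars
--     to more unique chars
--
--     Parameters:
--         words (list): list of words to compare
--
--     Returns:
--         sorted (list)
--     """
--     word_dict = {}
--
--     for word in words:
--         word_dict.update({word: 0})
--
--         for char in word:
--             if word.count(char) == 1:
--                 word_dict[word] += 1
--
--     # 1. loop through sorted(word_dict...)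
--     # 2. but at first sorted sorts the elements
--     # (values el[0]==key, el[1]==value) by value
--     # 3. only use the word from for word, num in sorted()
--     return [word for word, num in sorted(word_dict.items(), key=lambda el: el[1])]
-- ===== SOURCE B (Python) =====
-- def unique_char_sort(words):
--     # Dedup preserving first occurrence
--     seen = set()
--     uniq = []
--     for w in words:
--         if w not in seen:
--             seen.add(w)
--             uniq.append(w)
--     # Bucket each word by its number of once-occurring characters
--     buckets = {}
--     maxc = 0
--     for w in uniq:
--         counts = {}
--         for ch in w:
--             counts[ch] = counts.get(ch, 0) + 1
--         c = 0
--         for ch in w: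
--             if counts[ch] == 1:
--                 c += 1
--         buckets.setdefault(c, []).append(w)
--         if c > maxc:
--             maxc = c
--     # Concatenate buckets in ascending count order (counting sort, stable)
--     result = []
--     for c in range(maxc + 1):
--         result.extend(buckets.get(c, []))
--     return result
-- ===== Notes on version B (the rewrite author's own statement) =====
-- stated objective: faster
-- what changed: Replaces the dict-rebuild with per-char word.count scans plus a comparison sort by a seen-set dedup, a single Counter pass per word, and a stable bucket/counting sort concatenated in ascending count order.
import Mathlib
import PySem

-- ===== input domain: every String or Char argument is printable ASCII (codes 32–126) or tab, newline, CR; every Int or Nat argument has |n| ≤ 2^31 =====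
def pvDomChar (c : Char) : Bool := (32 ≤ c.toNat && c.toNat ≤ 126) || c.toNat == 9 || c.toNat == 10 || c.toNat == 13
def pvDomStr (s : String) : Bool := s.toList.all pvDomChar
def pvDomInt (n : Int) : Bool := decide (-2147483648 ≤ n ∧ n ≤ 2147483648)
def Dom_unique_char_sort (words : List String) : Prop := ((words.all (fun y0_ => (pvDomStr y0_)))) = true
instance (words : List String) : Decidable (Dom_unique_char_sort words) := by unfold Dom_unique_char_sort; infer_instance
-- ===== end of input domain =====

-- B replaces A's per-char word.count scans + comparison sort by a seen-set dedup, one counter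
-- pass per word, and a stable bucket/counting sort over the counts (faster on long words).

-- ===== PORT A =====
def unique_char_sort (words : List String) : List String :=
  let word_dict : PySem.Dict String Int :=
    words.foldl (fun d word =>
      let d := d.insert word 0                       -- word_dict.update({word: 0})
      word.toList.foldl (fun d char =>
        if PySem.Str.count word (String.ofList [char]) = 1
        then d.modify word 0 (· + 1)                 -- word_dict[word] += 1
        else d) d)
      PySem.Dict.empty
  (PySem.List.sorted word_dict.items (fun el => el.2)).map (fun p => p.1)

-- ===== PORT B =====
def unique_char_sort_alt (words : List String) : List String :=
  -- dedup preserving first occurrence, with a seen set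
  let st := words.foldl (fun (st : PySem.Set String × List String) w =>
      if st.1.contains w then st else (st.1.add w, st.2 ++ [w]))
      (PySem.Set.empty, [])
  let uniq := st.2
  -- bucket each word by its number of once-occurring characters, tracking the max count
  let bm := uniq.foldl (fun (bm : PySem.Dict Int (List String) × Int) w =>
      let counts := w.toList.foldl (fun d ch => d.modify ch 0 (· + 1))
        (PySem.Dict.empty : PySem.Dict Char Int)
      let c := w.toList.foldl (fun acc ch => if counts.getD ch 0 = 1 then acc + 1 else acc)
        (0 : Int)
      (bm.1.insert c (bm.1.getD c [] ++ [w]),        -- buckets.setdefault(c, []).append(w)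
       if bm.2 < c then c else bm.2))
      (PySem.Dict.empty, 0)
  -- concatenate buckets in ascending count order
  (PySem.List.pyRange 0 (bm.2 + 1)).foldl (fun acc c => acc ++ bm.1.getD c []) []

-- ===== PRECONDITION & SPEC =====
def Spec_unique_char_sort (words : List String) (out : List String) : Prop := out = unique_char_sort_alt words
instance (words : List String) (out : List String) : Decidable (Spec_unique_char_sort words out) := by unfold Spec_unique_char_sort; infer_instance

-- ===== CLAIM (what is proved, stated in full; the proofs are below) =====
def Claim_equal_unique_char_sort : Prop := ∀ (words : List String), Dom_unique_char_sort words → Spec_unique_char_sort words (unique_char_sort words)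

-- ===== LEMMAS AND PROOFS =====

-- the count both programs compute: number of characters of w occurring exactly once in w
def ucsCnt (w : String) : Int := (w.toList.countP (fun c => w.toList.count c == 1) : Nat)

-- the association list ds ↦ (ds, val ds) as a Dict
def mkD (ds : List String) (val : String → Int) : PySem.Dict String Int :=
  ⟨ds.map (fun u => (u, val u))⟩

lemma ucsCnt_nonneg (w : String) : 0 ≤ ucsCnt w := by
  simp [ucsCnt]

-- Python str.count with a single-character needle is List.count
lemma count_go_single (c : Char) :
    ∀ (l : List Char) (fuel acc : Nat), l.length ≤ fuel →
      PySem.Chars.count.go [c] fuel l acc = acc + l.count c := by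
  intro l
  induction l with
  | nil => intro fuel acc _; cases fuel <;> simp [PySem.Chars.count.go]
  | cons h t ih =>
    intro fuel acc hf
    cases fuel with
    | zero => simp at hf
    | succ n =>
      have hn : t.length ≤ n := by simpa using hf
      by_cases hc : h = c
      · have hpre : [c].isPrefixOf (h :: t) = true := by simp [List.isPrefixOf, hc]
        have hstep : PySem.Chars.count.go [c] (n + 1) (h :: t) acc
            = PySem.Chars.count.go [c] n t (acc + 1) := by
          simp [PySem.Chars.count.go, hpre]
        rw [hstep, ih n (acc + 1) hn, List.count_cons]
        simp [hc]
        omega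
      · have hpre : [c].isPrefixOf (h :: t) = false := by
          simp [List.isPrefixOf]
          exact fun hh => hc hh.symm
        have hstep : PySem.Chars.count.go [c] (n + 1) (h :: t) acc
            = PySem.Chars.count.go [c] n t acc := by
          simp [PySem.Chars.count.go, hpre]
        rw [hstep, ih n acc hn, List.count_cons]
        have : (h == c) = false := by simp [hc]
        simp [this]

lemma chars_count_single (l : List Char) (c : Char) :
    PySem.Chars.count l [c] = l.count c := by
  simp only [PySem.Chars.count, List.isEmpty_cons, if_false, Bool.false_eq_true]
  simpa using count_go_single c l l.length 0 le_rfl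

-- getD on a mkD dict
lemma getD_mkD (ds : List String) (val : String → Int) (w : String) (d0 : Int)
    (hw : w ∈ ds) : (mkD ds val).getD w d0 = val w := by
  induction ds with
  | nil => simp at hw
  | cons u t ih =>
    by_cases hu : u = w
    · subst hu
      simp [mkD, PySem.Dict.getD, PySem.Dict.get?]
    · have hw' : w ∈ t := by cases hw with
        | head => exact absurd rfl hu
        | tail _ h => exact h
      have := ih hw'
      simpa [mkD, PySem.Dict.getD, PySem.Dict.get?, hu] using this

lemma contains_mkD (ds : List String) (val : String → Int) (w : String) :
    (mkD ds val).contains w = ds.contains w := by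
  show (ds.map (fun u => (u, val u))).any (fun p => p.1 == w) = ds.contains w
  rw [List.any_map, List.contains_eq_any_beq]
  apply List.any_congr rfl
  intro u
  by_cases h : u = w
  · simp [h]
  · simp [Function.comp, h, Ne.symm h]

lemma insert_mkD_mem (ds : List String) (val : String → Int) (w : String) (v : Int)
    (hw : w ∈ ds) :
    (mkD ds val).insert w v = mkD ds (fun u => if u = w then v else val u) := by
  have hc : (mkD ds val).contains w = true := by
    rw [contains_mkD]; exact List.contains_iff_mem.2 hw
  simp only [PySem.Dict.insert, hc, if_pos]
  unfold mkD
  congr 1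
  simp only [List.map_map]
  apply List.map_congr_left
  intro u _
  by_cases hu : u = w <;> simp [hu]

lemma insert_mkD_not_mem (ds : List String) (val : String → Int) (w : String) (v : Int)
    (hw : w ∉ ds) :
    (mkD ds val).insert w v = mkD (ds ++ [w]) (fun u => if u = w then v else val u) := by
  have hc : (mkD ds val).contains w = false := by
    rw [contains_mkD]; simpa [List.contains_iff_mem] using hw
  simp only [PySem.Dict.insert, hc, Bool.false_eq_true, if_false]
  unfold mkD
  congr 1
  simp only [List.map_append, List.map_cons, List.map_nil, if_pos]
  congr 1
  apply List.map_congr_left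
  intro u hu
  have : u ≠ w := fun h => hw (h ▸ hu)
  simp [this]

lemma modify_mkD (ds : List String) (val : String → Int) (w : String)
    (hw : w ∈ ds) :
    (mkD ds val).modify w 0 (· + 1) = mkD ds (fun u => if u = w then val w + 1 else val u) := by
  unfold PySem.Dict.modify
  rw [getD_mkD ds val w 0 hw, insert_mkD_mem ds val w _ hw]

lemma mkD_congr (ds : List String) (f g : String → Int) (h : ∀ u ∈ ds, f u = g u) :
    mkD ds f = mkD ds g := by
  unfold mkD; congr 1
  apply List.map_congr_left
  intro u hu; rw [h u hu]

-- the inner char loop of A adds countP to w's entry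
lemma inner_fold_mkD (P : Char → Prop) [DecidablePred P] (w : String) :
    ∀ (chars : List Char) (ds : List String) (val : String → Int), w ∈ ds →
      chars.foldl (fun d char => if P char then d.modify w 0 (· + 1) else d) (mkD ds val)
        = mkD ds (fun u => if u = w then val w + (chars.countP (fun c => decide (P c)) : Nat) else val u) := by
  intro chars
  induction chars with
  | nil =>
    intro ds val hw
    simp only [List.foldl_nil, List.countP_nil, Nat.cast_zero, add_zero]
    exact (mkD_congr _ _ _ (fun u _ => by by_cases hu : u = w <;> simp [hu])).symm
  | cons ch rest ih =>
    intro ds val hw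
    by_cases hP : P ch
    · simp only [List.foldl_cons, if_pos hP, modify_mkD ds val w hw]
      rw [ih ds _ hw]
      apply mkD_congr
      intro u _
      by_cases hu : u = w
      · subst hu
        simp [List.countP_cons, hP]
        push_cast; ring
      · simp [hu]
    · simp only [List.foldl_cons, if_neg hP]
      rw [ih ds val hw]
      apply mkD_congr
      intro u _
      by_cases hu : u = w
      · subst hu
        simp [List.countP_cons, hP]
      · simp [hu]

-- A's per-word step sends mkD ds ucsCnt to mkD (ds.add w) ucsCnt
lemma step_mkD (ds : List String) (w : String) :
    (w.toList.foldl (fun d char =>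
        if PySem.Str.count w (String.ofList [char]) = 1 then d.modify w 0 (· + 1) else d)
      ((mkD ds ucsCnt).insert w 0))
      = mkD (PySem.Set.add ds w) ucsCnt := by
  by_cases hw : w ∈ ds
  · have hadd : PySem.Set.add ds w = ds := by
      have hc : List.contains ds w = true := List.contains_iff_mem.2 hw
      simp [PySem.Set.add, PySem.Set.contains, hc, hw]
    rw [insert_mkD_mem ds ucsCnt w 0 hw,
      inner_fold_mkD (fun char => PySem.Str.count w (String.ofList [char]) = 1) w w.toList ds _ hw,
      hadd]
    apply mkD_congr
    intro u _
    by_cases hu : u = w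
    · subst hu
      simp only [if_true, zero_add, ucsCnt, Nat.cast_inj]
      apply List.countP_congr
      intro c _
      simp [PySem.Str.count_eq, String.toList_ofList, chars_count_single]
    · simp [hu]
  · have hadd : PySem.Set.add ds w = ds ++ [w] := by
      have hc : List.contains ds w = false := by simpa [List.contains_iff_mem] using hw
      simp [PySem.Set.add, PySem.Set.contains, hc, hw]
    rw [insert_mkD_not_mem ds ucsCnt w 0 hw,
      inner_fold_mkD (fun char => PySem.Str.count w (String.ofList [char]) = 1) w w.toList (ds ++ [w]) _
        (by simp), hadd]
    apply mkD_congr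
    intro u _
    by_cases hu : u = w
    · subst hu
      simp only [if_true, zero_add, ucsCnt, Nat.cast_inj]
      apply List.countP_congr
      intro c _
      simp [PySem.Str.count_eq, String.toList_ofList, chars_count_single]
    · simp [hu]

-- A's outer fold, fully characterised
lemma outer_fold_mkD :
    ∀ (words : List String) (ds : List String),
      words.foldl (fun d word =>
          let d := d.insert word 0
          word.toList.foldl (fun d char =>
            if PySem.Str.count word (String.ofList [char]) = 1 then d.modify word 0 (· + 1) else d) d)
        (mkD ds ucsCnt)
      = mkD (words.foldl PySem.Set.add ds) ucsCnt := by
  intro words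
  induction words with
  | nil => intro ds; simp
  | cons w rest ih =>
    intro ds
    simp only [List.foldl_cons]
    rw [step_mkD ds w, ih (PySem.Set.add ds w)]

-- A as sorted over the dedup-with-count pairs
lemma unique_char_sort_eq (words : List String) :
    unique_char_sort words
      = (PySem.List.sorted ((PySem.Set.ofList words).map (fun w => (w, ucsCnt w)))
          (fun el => el.2)).map (fun p => p.1) := by
  unfold unique_char_sort
  have h0 : (PySem.Dict.empty : PySem.Dict String Int) = mkD [] ucsCnt := rfl
  rw [h0, outer_fold_mkD words []]
  rw [PySem.Set.ofList_eq_foldl]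
  rfl

-- insertBy passes over a prefix it does not go before
lemma insertBy_append (before : (String × Int) → (String × Int) → Bool) (x : String × Int) :
    ∀ (L R : List (String × Int)), (∀ y ∈ L, before x y = false) →
      PySem.List.insertBy before x (L ++ R) = L ++ PySem.List.insertBy before x R := by
  intro L
  induction L with
  | nil => intro R _; simp
  | cons y t ih =>
    intro R h
    have hy : before x y = false := h y (by simp)
    simp only [List.cons_append, PySem.List.insertBy, hy, Bool.false_eq_true, if_false]
    rw [ih R (fun z hz => h z (by simp [hz]))]

lemma insertBy_front (before : (String × Int) → (String × Int) → Bool) (x : String × Int)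
    (R : List (String × Int)) (h : ∀ y ∈ R, before x y = true) :
    PySem.List.insertBy before x R = x :: R := by
  cases R with
  | nil => simp [PySem.List.insertBy]
  | cons r rs => simp [PySem.List.insertBy, h r (by simp)]

lemma pyRange_self (a : Int) : PySem.List.pyRange a a = [] := by
  simp [PySem.List.pyRange]

-- stable sort by an Int key in [0, m] IS the concatenation of the key-buckets
lemma sorted_eq_buckets (key : (String × Int) → Int) :
    ∀ (xs : List (String × Int)) (m : Int), 0 ≤ m → (∀ x ∈ xs, 0 ≤ key x ∧ key x ≤ m) →
      PySem.List.sorted xs key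
        = (PySem.List.pyRange 0 (m + 1)).flatMap (fun c => xs.filter (fun x => key x == c)) := by
  intro xs
  induction xs using List.reverseRecOn with
  | nil =>
    intro m _ _
    simp [PySem.List.sorted]
  | append_singleton ys x ih =>
    intro m hm h
    have hx := h x (by simp)
    set k := key x with hk
    have hbounds : 0 ≤ k ∧ k ≤ m := hx
    have hys : ∀ y ∈ ys, 0 ≤ key y ∧ key y ≤ m := fun y hy => h y (by simp [hy])
    -- left side: insert x into sorted ys
    have hL : PySem.List.sorted (ys ++ [x]) key
        = PySem.List.insertBy (fun a b => decide (key a < key b)) x (PySem.List.sorted ys key) := by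
      rw [PySem.List.sorted_eq_foldl_insertBy, PySem.List.sorted_eq_foldl_insertBy,
        List.foldl_append]
      rfl
    rw [hL, ih m hm hys]
    -- split the range at k
    have hsplit1 : PySem.List.pyRange 0 (m + 1)
        = PySem.List.pyRange 0 (k + 1) ++ PySem.List.pyRange (k + 1) (m + 1) :=
      PySem.List.pyRange_one_append 0 (k + 1) (m + 1) (by omega) (by omega)
    have hsplit2 : PySem.List.pyRange 0 (k + 1)
        = PySem.List.pyRange 0 k ++ [k] := by
      rw [PySem.List.pyRange_one_append 0 k (k + 1) (by omega) (by omega),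
        PySem.List.pyRange_one_cons (a := k) (b := k + 1) (by omega), pyRange_self]
    have memLo : ∀ c ∈ PySem.List.pyRange 0 (k + 1), c ≤ k := by
      intro c hc
      rcases (PySem.List.mem_pyRange_iff_of_pos (by omega) c).1 hc with ⟨_, hlt, _⟩
      omega
    have memLo' : ∀ c ∈ PySem.List.pyRange 0 k, c < k := by
      intro c hc
      rcases (PySem.List.mem_pyRange_iff_of_pos (by omega) c).1 hc with ⟨_, hlt, _⟩
      omega
    have memHi : ∀ c ∈ PySem.List.pyRange (k + 1) (m + 1), k < c := by
      intro c hc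
      rcases (PySem.List.mem_pyRange_iff_of_pos (by omega) c).1 hc with ⟨hle, _, _⟩
      omega
    set f := fun c => ys.filter (fun y => key y == c) with hf
    set g := fun c => (ys ++ [x]).filter (fun y => key y == c) with hg
    have hfg_lo : ∀ c ∈ PySem.List.pyRange 0 k, g c = f c := by
      intro c hc
      have : ¬ (key x == c) = true := by
        simp only [beq_iff_eq]; have := memLo' c hc; omega
      simp [hg, hf, List.filter_append, this]
    have hfg_hi : ∀ c ∈ PySem.List.pyRange (k + 1) (m + 1), g c = f c := by
      intro c hc
      have : ¬ (key x == c) = true := by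
        simp only [beq_iff_eq]; have := memHi c hc; omega
      simp [hg, hf, List.filter_append, this]
    have hfg_k : g k = f k ++ [x] := by
      simp [hg, hf, List.filter_append, hk]
    -- RHS rewritten
    have hR : (PySem.List.pyRange 0 (m + 1)).flatMap g
        = (PySem.List.pyRange 0 k).flatMap f ++ (f k ++ [x])
            ++ (PySem.List.pyRange (k + 1) (m + 1)).flatMap f := by
      rw [hsplit1, hsplit2, List.flatMap_append, List.flatMap_append,
        List.flatMap_congr hfg_lo, List.flatMap_congr hfg_hi]
      simp [hfg_k]
    rw [hR]
    -- LHS: insert into the bucket decomposition of sorted ys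
    have hLdec : (PySem.List.pyRange 0 (k + 1)).flatMap f
        = (PySem.List.pyRange 0 k).flatMap f ++ f k := by
      rw [hsplit2, List.flatMap_append]; simp
    have hLsplit : (PySem.List.pyRange 0 (m + 1)).flatMap f
        = ((PySem.List.pyRange 0 k).flatMap f ++ f k)
            ++ (PySem.List.pyRange (k + 1) (m + 1)).flatMap f := by
      rw [hsplit1, List.flatMap_append, hLdec]
    rw [hLsplit]
    have hmemL : ∀ y ∈ (PySem.List.pyRange 0 k).flatMap f ++ f k,
        (decide (key x < key y)) = false := by
      intro y hy
      rcases List.mem_append.1 hy with hy | hy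
      · rcases List.mem_flatMap.1 hy with ⟨c, hc, hyc⟩
        have := memLo' c hc
        have hkey : key y = c := by
          have := List.of_mem_filter hyc
          simpa using this
        simp only [decide_eq_false_iff_not, not_lt]
        omega
      · have hkey : key y = k := by
          have := List.of_mem_filter hy
          simpa using this
        simp only [decide_eq_false_iff_not, not_lt]
        omega
    have hmemR : ∀ y ∈ (PySem.List.pyRange (k + 1) (m + 1)).flatMap f,
        (decide (key x < key y)) = true := by
      intro y hy
      rcases List.mem_flatMap.1 hy with ⟨c, hc, hyc⟩
      have := memHi c hc
      have hkey : key y = c := by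
        have := List.of_mem_filter hyc
        simpa using this
      simp only [decide_eq_true_eq]
      omega
    rw [insertBy_append _ x _ _ hmemL, insertBy_front _ x _ hmemR]
    simp

-- B-side: the seen set and the uniq list coincide
lemma dedup_fold (words : List String) :
    ∀ (s : PySem.Set String),
      words.foldl (fun (st : PySem.Set String × List String) w =>
          if st.1.contains w then st else (st.1.add w, st.2 ++ [w])) (s, s)
        = (words.foldl PySem.Set.add s, words.foldl PySem.Set.add s) := by
  induction words with
  | nil => intro s; simp
  | cons w rest ih =>
    intro s
    simp only [List.foldl_cons]
    by_cases hc : PySem.Set.contains s w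
    · have hadd : PySem.Set.add s w = s := by
        unfold PySem.Set.add; rw [hc]; simp
      simp only [hc, if_pos, hadd]
      exact ih s
    · have hcf : PySem.Set.contains s w = false := by simpa using hc
      have hadd : PySem.Set.add s w = s ++ [w] := by
        unfold PySem.Set.add; rw [hcf]; simp
      simp only [hcf, Bool.false_eq_true, if_false, hadd]
      exact ih (s ++ [w])

-- B-side: the per-word count computed via the counter dict is ucsCnt
lemma count_once_eq (w : String) :
    (w.toList.foldl (fun acc ch =>
        if (w.toList.foldl (fun d ch => d.modify ch 0 (· + 1))
              (PySem.Dict.empty : PySem.Dict Char Int)).getD ch 0 = 1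
        then acc + 1 else acc) (0 : Int))
      = ucsCnt w := by
  have hget : ∀ ch : Char,
      (w.toList.foldl (fun d ch => d.modify ch 0 (· + 1))
          (PySem.Dict.empty : PySem.Dict Char Int)).getD ch 0 = (w.toList.count ch : Int) := by
    intro ch
    have := PySem.Dict.getD_foldl_modify_add_one w.toList
      (PySem.Dict.empty : PySem.Dict Char Int) ch
    simpa [PySem.Dict.getD, PySem.Dict.get?, PySem.Dict.empty] using this
  rw [PySem.List.foldl_ite_add_one]
  rw [ucsCnt]
  simp only [zero_add, Nat.cast_inj]
  apply List.countP_congr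
  intro c _
  simp [hget c]

-- B-side: the bucket dict fold, characterised
lemma bucket_fold (key : String → Int) :
    ∀ (l : List String) (b : PySem.Dict Int (List String)) (c : Int),
      (l.foldl (fun b w => b.insert (key w) (b.getD (key w) [] ++ [w])) b).getD c []
        = b.getD c [] ++ l.filter (fun w => key w == c) := by
  intro l
  induction l with
  | nil => intro b c; simp
  | cons w rest ih =>
    intro b c
    simp only [List.foldl_cons, List.filter_cons]
    rw [ih]
    by_cases hc : key w = c
    · simp only [hc, beq_self_eq_true, if_pos]
      rw [PySem.Dict.getD_insert]
      simp [hc]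
    · have : (key w == c) = false := by simp [hc]
      simp only [this, Bool.false_eq_true, if_false]
      rw [PySem.Dict.getD_insert]
      simp [Ne.symm hc]

-- main theorem body
lemma main_eq (words : List String) :
    unique_char_sort words = unique_char_sort_alt words := by
  rw [unique_char_sort_eq]
  unfold unique_char_sort_alt
  simp only []
  -- rewrite B's dedup fold
  have hempt : (PySem.Set.empty : PySem.Set String) = ([] : List String) := rfl
  rw [hempt]
  rw [dedup_fold words []]
  set uniq := words.foldl PySem.Set.add [] with huniq
  have huniq' : PySem.Set.ofList words = uniq := PySem.Set.ofList_eq_foldl words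
  -- rewrite B's per-word count
  have hbody : (fun (bm : PySem.Dict Int (List String) × Int) (w : String) =>
      let counts := w.toList.foldl (fun d ch => d.modify ch 0 (· + 1))
        (PySem.Dict.empty : PySem.Dict Char Int)
      let c := w.toList.foldl (fun acc ch => if counts.getD ch 0 = 1 then acc + 1 else acc)
        (0 : Int)
      (bm.1.insert c (bm.1.getD c [] ++ [w]), if bm.2 < c then c else bm.2))
      = (fun bm w =>
        ((fun (b : PySem.Dict Int (List String)) (w : String) =>
            b.insert (ucsCnt w) (b.getD (ucsCnt w) [] ++ [w])) bm.1 w,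
         (fun (mx : Int) (w : String) => max mx (ucsCnt w)) bm.2 w)) := by
    funext bm w
    simp only [count_once_eq w]
    congr 1
    by_cases h : bm.2 < ucsCnt w
    · rw [if_pos h, max_eq_right (le_of_lt h)]
    · rw [if_neg h, max_eq_left (by omega)]
  rw [hbody]
  simp only []
  rw [PySem.List.foldl_prod_mk (f := fun (b : PySem.Dict Int (List String)) (w : String) =>
      b.insert (ucsCnt w) (b.getD (ucsCnt w) [] ++ [w]))
    (g := fun (mx : Int) (w : String) => max mx (ucsCnt w))]
  simp only []
  set buckets := uniq.foldl (fun (b : PySem.Dict Int (List String)) w =>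
    b.insert (ucsCnt w) (b.getD (ucsCnt w) [] ++ [w])) PySem.Dict.empty with hbuckets
  set m := uniq.foldl (fun (mx : Int) w => max mx (ucsCnt w)) 0 with hmdef
  have hmax := PySem.List.le_foldl_max_int uniq ucsCnt 0
  have hm0 : (0 : Int) ≤ m := hmax.1
  have hmle : ∀ w ∈ uniq, ucsCnt w ≤ m := hmax.2
  -- B's result as flatMap of buckets
  rw [PySem.List.foldl_append_eq_flatMap]
  have hbget : ∀ c : Int, buckets.getD c [] = uniq.filter (fun w => ucsCnt w == c) := by
    intro c
    rw [hbuckets, bucket_fold ucsCnt uniq PySem.Dict.empty c]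
    simp [PySem.Dict.getD, PySem.Dict.get?, PySem.Dict.empty]
  -- A's result via the sort-buckets lemma
  rw [huniq']
  rw [sorted_eq_buckets (fun el => el.2) (uniq.map (fun w => (w, ucsCnt w))) m hm0
    (by
      intro x hx
      rcases List.mem_map.1 hx with ⟨w, hw, rfl⟩
      exact ⟨ucsCnt_nonneg w, hmle w hw⟩)]
  rw [List.map_flatMap]
  simp only [List.nil_append]
  apply List.flatMap_congr
  intro c _
  rw [hbget c]
  rw [List.filter_map]
  have h1 : ((fun (p : String × Int) => p.1) ∘ fun w => (w, ucsCnt w)) = fun w : String => w := rfl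
  have h2 : ((fun (x : String × Int) => x.2 == c) ∘ fun w => (w, ucsCnt w))
      = fun w : String => ucsCnt w == c := rfl
  rw [h2, List.map_map, h1, List.map_id']

-- ===== VERDICT (by name: the statement is the Claim_ definition above) =====
theorem unique_char_sort_spec : Claim_equal_unique_char_sort := by
  intro words _
  unfold Spec_unique_char_sort
  exact main_eq words
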